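-- pv_equiv track=rewrite | github.com/vncloudsco/splunk | lib/python2.7/site-packages/splunk/mining/interactivedates.py | makeregex
-- ===== SOURCE A (Python) =====
-- def makeregex(text):
--     regex = ""
--     addedPlus = False
--     lastchtype = None
--     for ch in text:
--         if ch.isalpha():
--             chtype = "\w"
--         elif ch.isdigit():
--             chtype = "\d+"
--             addedPlus = True
--         elif ch.isspace():
--             chtype = "\s"
--         else:
--             if ch in "[](){}?*.^+<>":
--                 chtype = "\\" + ch
--             else:
--                 chtype = ch
--         if lastchtype == chtype:
--             if not addedPlus:
--                 regex += "+"
--                 addedPlus = True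
--         else:
--             regex += chtype
--             addedPlus = False
--         lastchtype = chtype
--     return regex
-- ===== SOURCE B (Python) =====
-- def _cls(ch):
--     if ch.isalpha():
--         return "\\w"
--     if ch.isdigit():
--         return "\\d+"
--     if ch.isspace():
--         return "\\s"
--     if ch in "[](){}?*.^+<>":
--         return "\\" + ch
--     return ch
--
--
-- def makeregex(text):
--     # two-phase: classify every char, then emit one token per run of equal classes
--     classes = [_cls(ch) for ch in text]
--     out = []
--     i = 0
--     n = len(classes)
--     while i < n:
--         c = classes[i]
--         j = i + 1
--         while j < n and classes[j] == c:
--             j += 1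
--         out.append(c)
--         if j - i > 1 and c != "\\d+":
--             out.append("+")
--         i = j
--     return "".join(out)
-- ===== Notes on version B (the rewrite author's own statement) =====
-- stated objective: idiomatic
-- what changed: B replaces A's single-pass state machine (lastchtype/addedPlus flags) by a two-phase pass: classify every character into its regex class, then scan run-by-run over consecutive equal classes, emitting each class once with an optional plus-quantifier per run.
import Mathlib
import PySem

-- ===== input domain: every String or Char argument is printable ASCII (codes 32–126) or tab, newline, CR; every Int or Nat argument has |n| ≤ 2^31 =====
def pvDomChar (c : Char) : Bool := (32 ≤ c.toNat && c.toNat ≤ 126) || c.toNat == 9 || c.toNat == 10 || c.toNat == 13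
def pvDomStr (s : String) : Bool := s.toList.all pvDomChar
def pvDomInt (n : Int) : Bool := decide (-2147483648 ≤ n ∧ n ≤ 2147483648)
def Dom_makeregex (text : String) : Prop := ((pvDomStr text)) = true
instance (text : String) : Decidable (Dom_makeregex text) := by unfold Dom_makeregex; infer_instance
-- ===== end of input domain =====

-- B replaces A's running lastchtype/addedPlus state machine by a two-phase pass:
-- classify every character, then emit one token (with an optional '+') per run of equal classes.

-- ===== PORT A =====
-- the characters of "[](){}?*.^+<>"
def mrSpecials : List Char := ['[', ']', '(', ')', '{', '}', '?', '*', '.', '^', '+', '<', '>']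

-- one iteration of A's for-loop; state = (regex, addedPlus, lastchtype), strings as char lists
def makeregexStep (st : List Char × Bool × Option (List Char)) (ch : Char) :
    List Char × Bool × Option (List Char) :=
  match st with
  | (regex, addedPlus, lastchtype) =>
    let p : List Char × Bool :=
      if PySem.Chars.isalpha ch then (['\\', 'w'], addedPlus)
      else if PySem.Chars.isdigit ch then (['\\', 'd', '+'], true)
      else if PySem.Chars.isspace ch then (['\\', 's'], addedPlus)
      else if ch ∈ mrSpecials then (['\\', ch], addedPlus)
      else ([ch], addedPlus)
    let chtype := p.1
    let ap := p.2
    if lastchtype = some chtype then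
      if !ap then (regex ++ ['+'], true, some chtype)
      else (regex, ap, some chtype)
    else (regex ++ chtype, false, some chtype)

def makeregex (text : String) : String :=
  String.ofList (text.toList.foldl makeregexStep ([], false, none)).1

-- ===== PORT B =====
def mrClassify (ch : Char) : List Char :=
  if PySem.Chars.isalpha ch then ['\\', 'w']
  else if PySem.Chars.isdigit ch then ['\\', 'd', '+']
  else if PySem.Chars.isspace ch then ['\\', 's']
  else if ch ∈ mrSpecials then ['\\', ch]
  else [ch]

-- Source B's outer while-loop: one recursive call per run of equal classes
-- (the inner while-loop advancing j is the takeWhile/dropWhile split at the run boundary)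
def mrEmitRuns : List (List Char) → List Char
  | [] => []
  | c :: cs =>
    let run := cs.takeWhile (· == c)
    let rest := cs.dropWhile (· == c)
    c ++ (if run.length + 1 > 1 ∧ c ≠ ['\\', 'd', '+'] then ['+'] else []) ++ mrEmitRuns rest
termination_by l => l.length
decreasing_by
  have := List.length_dropWhile_le (· == c) cs
  simp only [List.length_cons]
  omega

def makeregex_alt (text : String) : String :=
  String.ofList (mrEmitRuns (text.toList.map mrClassify))

-- ===== PRECONDITION & SPEC =====
def Spec_makeregex (text : String) (out : String) : Prop := out = makeregex_alt text
instance (text : String) (out : String) : Decidable (Spec_makeregex text out) := by unfold Spec_makeregex; infer_instance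

-- ===== CLAIM (what is proved, stated in full; the proofs are below) =====
def Claim_equal_makeregex : Prop := ∀ (text : String), Dom_makeregex text → Spec_makeregex text (makeregex text)

-- ===== LEMMAS AND PROOFS =====

lemma mrEmitRuns_nil : mrEmitRuns [] = [] := by rw [mrEmitRuns]

lemma mrEmitRuns_cons (c : List Char) (cs : List (List Char)) :
    mrEmitRuns (c :: cs) =
      c ++ (if (cs.takeWhile (· == c)).length + 1 > 1 ∧ c ≠ ['\\', 'd', '+'] then ['+'] else [])
        ++ mrEmitRuns (cs.dropWhile (· == c)) := by
  rw [mrEmitRuns]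

-- A's per-character step, re-expressed on the class of the character
def mrClsStep (st : List Char × Bool × Option (List Char)) (c : List Char) :
    List Char × Bool × Option (List Char) :=
  let ap := if c = ['\\', 'd', '+'] then true else st.2.1
  if st.2.2 = some c then
    if !ap then (st.1 ++ ['+'], true, some c)
    else (st.1, ap, some c)
  else (st.1 ++ c, false, some c)

lemma mrStep_eq (st : List Char × Bool × Option (List Char)) (ch : Char) :
    makeregexStep st ch = mrClsStep st (mrClassify ch) := by
  obtain ⟨r, ap, last⟩ := st
  have hw : (['\\', 'w'] : List Char) ≠ ['\\', 'd', '+'] := by decide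
  have hs : (['\\', 's'] : List Char) ≠ ['\\', 'd', '+'] := by decide
  have hb : ∀ c : Char, (['\\', c] : List Char) ≠ ['\\', 'd', '+'] := by
    intro c h; simpa using congrArg List.length h
  have ho : ∀ c : Char, ([c] : List Char) ≠ ['\\', 'd', '+'] := by
    intro c h; simpa using congrArg List.length h
  by_cases h1 : PySem.Chars.isalpha ch
  · simp [makeregexStep, mrClassify, mrClsStep, h1, hw]
  by_cases h2 : PySem.Chars.isdigit ch
  · simp [makeregexStep, mrClassify, mrClsStep, h1, h2]
  by_cases h3 : PySem.Chars.isspace ch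
  · simp [makeregexStep, mrClassify, mrClsStep, h1, h2, h3, hs]
  by_cases h4 : ch ∈ mrSpecials
  · simp [makeregexStep, mrClassify, mrClsStep, h1, h2, h3, h4, hb ch]
  · simp [makeregexStep, mrClassify, mrClsStep, h1, h2, h3, h4, ho ch]

lemma mrFoldl_eq (l : List Char) (st : List Char × Bool × Option (List Char)) :
    l.foldl makeregexStep st = (l.map mrClassify).foldl mrClsStep st := by
  rw [List.foldl_map]
  induction l generalizing st with
  | nil => rfl
  | cons c cs ih => simp only [List.foldl_cons, mrStep_eq, ih]

-- once the flag is set, further repeats of the same class are absorbed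
lemma mrSkip (c : List Char) (run rest : List (List Char)) (r : List Char)
    (h : ∀ x ∈ run, x = c) :
    (run ++ rest).foldl mrClsStep (r, true, some c) = rest.foldl mrClsStep (r, true, some c) := by
  induction run with
  | nil => rfl
  | cons x run' ih =>
    have hx : x = c := h x (by simp)
    have hstep : mrClsStep (r, true, some c) c = (r, true, some c) := by
      by_cases hc : c = ['\\', 'd', '+'] <;> simp [mrClsStep, hc]
    simp only [List.cons_append, List.foldl_cons, hx, hstep]
    exact ih (fun y hy => h y (List.mem_cons_of_mem _ hy))

lemma mrHead_dropWhile (p : List Char → Bool) (l : List (List Char)) (x : List Char)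
    (hx : (l.dropWhile p).head? = some x) : p x = false := by
  induction l with
  | nil => simp [List.dropWhile] at hx
  | cons a l' ih =>
    by_cases hp : p a
    · simp [List.dropWhile, hp] at hx; exact ih hx
    · simp [List.dropWhile, hp] at hx
      subst hx; simpa using hp

lemma mrMain : ∀ n (cs : List (List Char)), cs.length ≤ n →
    ∀ (r : List Char) (ap : Bool) (last : Option (List Char)),
    (∀ c, last = some c → cs.head? ≠ some c) →
    (cs.foldl mrClsStep (r, ap, last)).1 = r ++ mrEmitRuns cs := by
  intro n
  induction n with
  | zero =>
    intro cs hlen r ap last _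
    have : cs = [] := List.length_eq_zero_iff.mp (Nat.le_zero.mp hlen)
    subst this; simp [mrEmitRuns_nil]
  | succ n ih =>
    intro cs hlen r ap last hh
    cases cs with
    | nil => simp [mrEmitRuns_nil]
    | cons c cs' =>
      have hlen' : cs'.length ≤ n := by simp at hlen; omega
      have hne : last ≠ some c := fun h => hh c h (by simp)
      have hstep : mrClsStep (r, ap, last) c = (r ++ c, false, some c) := by
        simp [mrClsStep, hne]
      rw [List.foldl_cons, hstep]
      have hrestlen : (cs'.dropWhile (· == c)).length ≤ n :=
        le_trans (List.length_dropWhile_le _ _) hlen'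
      have hresthead : ∀ d, (some c : Option (List Char)) = some d →
          (cs'.dropWhile (· == c)).head? ≠ some d := by
        intro d hd hcontra
        injection hd with hd; subst hd
        have := mrHead_dropWhile (· == c) cs' _ hcontra
        simp at this
      rcases hrun : cs'.takeWhile (· == c) with _ | ⟨x, run'⟩
      · -- run empty: the next class (if any) differs, recurse on all of cs'
        rcases cs' with _ | ⟨y, ys⟩
        · simp [mrEmitRuns_cons, mrEmitRuns_nil]
        · have hy : (y == c) = false := by
            by_contra h
            have h' : (y == c) = true := by simpa using h
            simp [h'] at hrun
          have hrest : (y :: ys).dropWhile (· == c) = y :: ys := by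
            simp [hy]
          have hih := ih (y :: ys) hlen' (r ++ c) false (some c)
            (by intro d hd; injection hd with hd; subst hd; simp; intro h; rw [h] at hy; simp at hy)
          rw [hih]
          conv_rhs => rw [mrEmitRuns_cons]
          rw [hrun, hrest]
          simp
      · -- run nonempty: one '+' (unless the class is \d+), then skip, then recurse on the rest
        have hx : x = c := by
          have hxmem : x ∈ cs'.takeWhile (· == c) := by rw [hrun]; simp
          simpa using List.mem_takeWhile_imp hxmem
        rw [hx] at hrun
        have hrun'mem : ∀ y ∈ run', y = c := by
          intro y hy
          have : y ∈ cs'.takeWhile (· == c) := by rw [hrun]; simp [hy]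
          simpa using List.mem_takeWhile_imp this
        have hdecomp : cs' = c :: (run' ++ cs'.dropWhile (· == c)) := by
          have h := List.takeWhile_append_dropWhile (p := (· == c)) (l := cs')
          rw [hrun] at h
          simpa using h.symm
        conv_lhs => rw [hdecomp]
        rw [List.foldl_cons]
        have hihrest := ih (cs'.dropWhile (· == c)) hrestlen
        by_cases hc : c = ['\\', 'd', '+']
        · have hstep2 : mrClsStep (r ++ c, false, some c) c = (r ++ c, true, some c) := by
            simp [mrClsStep, hc]
          rw [hstep2, mrSkip c run' _ _ hrun'mem,
              hihrest (r ++ c) true (some c) hresthead, mrEmitRuns_cons, hrun]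
          simp [hc]
        · have hstep2 : mrClsStep (r ++ c, false, some c) c = (r ++ c ++ ['+'], true, some c) := by
            simp [mrClsStep, hc]
          rw [hstep2, mrSkip c run' _ _ hrun'mem,
              hihrest (r ++ c ++ ['+']) true (some c) hresthead, mrEmitRuns_cons, hrun]
          simp [hc]

-- ===== VERDICT (by name: the statement is the Claim_ definition above) =====
theorem makeregex_spec : Claim_equal_makeregex := by
  intro text _
  unfold Spec_makeregex makeregex makeregex_alt
  rw [mrFoldl_eq,
      mrMain (text.toList.map mrClassify).length (text.toList.map mrClassify) le_rfl
        [] false none (by intro c h; cases h)]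
  rfl
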